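-- pv_equiv track=rewrite | github.com/cressox/Krypto_WS_2023-24 | 11/sha3.py | permutation_function
-- ===== SOURCE A (Python) =====
-- def theta(A):
--     B = [[[A[x][y][z] for z in range(64)] for y in range(5)] for x in range(5)]
--     C = [[0]*64 for _ in range(5)]
--     for x in range(5):
--         for z in range(64):
--             C[x][z] = A[x][0][z] ^ A[x][1][z] ^ A[x][2][z] ^ A[x][3][z] ^ A[x][4][z]
--     for x in range(5):
--         for y in range(5):
--             for z in range(64):
--                 B[x][y][z] = A[x][y][z] ^ C[(x-1) % 5][z] ^ C[(x+1) % 5][(z-1) % 64]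
--     return B
--
-- def permutation_function(S):
--     A = [[[0 for _ in range(64)] for _ in range(5)] for _ in range(5)]
--     for i, bit in enumerate(bin(int(S, 16))[2:].zfill(1600)):
--         A[i % 5][(i // 5) % 5][i // 25] = int(bit)
--     for _ in range(24):
--         A = theta(A)
--     bits = ''.join(str(A[x][y][z]) for x in range(5) for y in range(5) for z in range(64))
--     S = hex(int(bits, 2))[2:].rstrip('L').zfill(1600 // 4)
--     return S
-- ===== SOURCE B (Python) =====
-- _MASK = (1 << 64) - 1
--
--
-- def permutation_function(S):
--     # theta is linear over GF(2) and its per-round adjustment D[x] depends only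
--     # on the 5 column parities C, which evolve autonomously (C'[x] = C[x]^D[x],
--     # five xors of D collapse to one).  So: run the 24 rounds on the 5 parity
--     # lanes alone, accumulate E[x] = xor of every round's D[x], and xor E into
--     # the 25-lane state once at the end.
--     lanes = [[0] * 5 for _ in range(5)]
--     for i, bit in enumerate(bin(int(S, 16))[2:].zfill(1600)):
--         if bit == '1':
--             lanes[i % 5][(i // 5) % 5] |= 1 << (i // 25)
--     C = [lanes[x][0] ^ lanes[x][1] ^ lanes[x][2] ^ lanes[x][3] ^ lanes[x][4]
--          for x in range(5)]
--     E = [0] * 5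
--     for _ in range(24):
--         D = [C[(x - 1) % 5] ^ (((C[(x + 1) % 5] << 1) | (C[(x + 1) % 5] >> 63)) & _MASK)
--              for x in range(5)]
--         E = [E[x] ^ D[x] for x in range(5)]
--         C = [C[x] ^ D[x] for x in range(5)]
--     bits = ''.join(str(((lanes[x][y] ^ E[x]) >> z) & 1)
--                    for x in range(5) for y in range(5) for z in range(64))
--     return hex(int(bits, 2))[2:].rstrip('L').zfill(1600 // 4)
-- ===== Notes on version B (the rewrite author's own statement) =====
-- stated objective: faster
-- what changed: B exploits that theta is GF(2)-linear and its round adjustment D depends only on the 5 column parities, which evolve autonomously: instead of updating a 5x5x64 bit state 24 times, B iterates only the 5 parity lanes for 24 rounds, accumulates the total adjustment E[x], and xors it into the packed 25-lane state once at the end.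
import Mathlib
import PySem

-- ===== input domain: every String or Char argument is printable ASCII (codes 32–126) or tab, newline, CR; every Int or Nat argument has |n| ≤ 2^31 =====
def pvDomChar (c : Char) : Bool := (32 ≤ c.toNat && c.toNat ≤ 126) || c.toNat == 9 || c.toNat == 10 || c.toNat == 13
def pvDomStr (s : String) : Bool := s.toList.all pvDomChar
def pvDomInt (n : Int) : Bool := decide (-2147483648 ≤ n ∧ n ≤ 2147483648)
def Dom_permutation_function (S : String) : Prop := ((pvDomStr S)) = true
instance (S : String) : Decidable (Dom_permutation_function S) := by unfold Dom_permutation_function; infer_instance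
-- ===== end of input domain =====

-- B uses that theta is GF(2)-linear with a round adjustment depending only on the 5
-- autonomously-evolving column parities: it iterates the 24 rounds on 5 parity lanes only,
-- accumulates the total adjustment, and applies it to the packed state once (objective: faster).

-- ===== SHARED HELPERS (these Python expressions occur verbatim in BOTH Source A and Source B) =====

-- bin(int(S, 16))[2:].zfill(1600)   (int(S,16) = PySem.Int.ofStrBase?; getD 0 unreachable under Pre_)
def pvBits (S : String) : List Char :=
  PySem.Chars.zfill
    (PySem.List.slice (PySem.Int.toBinChars0b ((PySem.Int.ofStrBase? S 16).getD 0)) (some 2) none)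
    1600

-- hex(n): PySem has no hex(); ported by hand, exact for every int (digits via repeated
-- divmod 16, lowercase a–f, '-0x' prefix for negatives, '0x0' for zero) — as CPython does.
def pvHexAux (n : Nat) (acc : List Char) : List Char :=
  if h : n = 0 then acc else pvHexAux (n / 16) (Nat.digitChar (n % 16) :: acc)
decreasing_by exact Nat.div_lt_self (Nat.pos_of_ne_zero h) (by omega)

def pvHex (n : Int) : List Char :=
  if n < 0 then '-' :: '0' :: 'x' :: pvHexAux n.natAbs []
  else if n = 0 then ['0', 'x', '0']
  else '0' :: 'x' :: pvHexAux n.toNat []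

-- hex(int(bits, 2))[2:].rstrip('L').zfill(1600 // 4)
-- (.rstrip('L') ported by hand as reverse/dropWhile/reverse — exact; a no-op on hex output)
def pvFormat (bits : List Char) : String :=
  String.ofList (PySem.Chars.zfill
    (((PySem.List.slice (pvHex ((PySem.Int.ofCharsBase? bits 2).getD 0)) (some 2) none).reverse.dropWhile
        (· == 'L')).reverse)
    (PySem.Int.floordiv 1600 4))

-- list-subscript assignment  l[i] = v  /  l[i][j] = v  /  l[i][j][k] = v
def pvSet2 (C : List (List Int)) (x z : Int) (v : Int) : List (List Int) :=
  PySem.List.pySetD C x (PySem.List.pySetD (PySem.List.pyGetD C x []) z v)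

def pvGet2 (C : List (List Int)) (x z : Int) : Int :=
  PySem.List.pyGetD (PySem.List.pyGetD C x []) z 0

-- ===== PORT A =====

def pvGet3 (A : List (List (List Int))) (x y z : Int) : Int :=
  PySem.List.pyGetD (PySem.List.pyGetD (PySem.List.pyGetD A x []) y []) z 0

def pvSet3 (A : List (List (List Int))) (x y z : Int) (v : Int) : List (List (List Int)) :=
  PySem.List.pySetD A x
    (PySem.List.pySetD (PySem.List.pyGetD A x [])  y
      (PySem.List.pySetD (PySem.List.pyGetD (PySem.List.pyGetD A x []) y []) z v))

-- theta(A), line by line: B = copy-comprehension, C = [[0]*64]*5 then the C-loop,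
-- then the B-loop; the loops are folds over the same ranges writing the same cells.
def pvThetaB0 (A : List (List (List Int))) : List (List (List Int)) :=
  (PySem.List.pyRange 0 5 1).map (fun x => (PySem.List.pyRange 0 5 1).map (fun y =>
    (PySem.List.pyRange 0 64 1).map (fun z => pvGet3 A x y z)))

def pvThetaC (A : List (List (List Int))) : List (List Int) :=
  (PySem.List.pyRange 0 5 1).foldl (fun C x => (PySem.List.pyRange 0 64 1).foldl (fun C z =>
      pvSet2 C x z (PySem.Int.bxor (PySem.Int.bxor (PySem.Int.bxor (PySem.Int.bxor
        (pvGet3 A x 0 z) (pvGet3 A x 1 z)) (pvGet3 A x 2 z)) (pvGet3 A x 3 z)) (pvGet3 A x 4 z))) C)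
    ((PySem.List.pyRange 0 5 1).map (fun _ => List.replicate 64 (0 : Int)))

def pvThetaBody (A : List (List (List Int))) (C : List (List Int)) : List (List (List Int)) :=
  (PySem.List.pyRange 0 5 1).foldl (fun B x => (PySem.List.pyRange 0 5 1).foldl (fun B y =>
    (PySem.List.pyRange 0 64 1).foldl (fun B z =>
      pvSet3 B x y z (PySem.Int.bxor (PySem.Int.bxor (pvGet3 A x y z)
        (pvGet2 C (PySem.Int.mod (x - 1) 5) z))
        (pvGet2 C (PySem.Int.mod (x + 1) 5) (PySem.Int.mod (z - 1) 64)))) B) B)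
    (pvThetaB0 A)

def pvTheta (A : List (List (List Int))) : List (List (List Int)) :=
  pvThetaBody A (pvThetaC A)

def pvScatterA (cs : List Char) : List (List (List Int)) :=
  (PySem.List.enumerate cs 0).foldl (fun A p =>
      pvSet3 A (PySem.Int.mod p.1 5) (PySem.Int.mod (PySem.Int.floordiv p.1 5) 5)
        (PySem.Int.floordiv p.1 25) ((PySem.Int.ofChars? [p.2]).getD 0))
    ((PySem.List.pyRange 0 5 1).map (fun _ => (PySem.List.pyRange 0 5 1).map (fun _ =>
       (PySem.List.pyRange 0 64 1).map (fun _ => (0 : Int)))))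

def pvSerialA (A : List (List (List Int))) : List Char :=
  PySem.Chars.join [] ((PySem.List.pyRange 0 5 1).flatMap (fun x =>
    (PySem.List.pyRange 0 5 1).flatMap (fun y =>
      (PySem.List.pyRange 0 64 1).map (fun z => PySem.Int.toChars (pvGet3 A x y z)))))

def permutation_function (S : String) : String :=
  pvFormat (pvSerialA ((PySem.List.pyRange 0 24 1).foldl (fun A _ => pvTheta A) (pvScatterA (pvBits S))))

-- ===== PORT B =====

def pvMask : Int := (1 <<< 64) - 1   -- _MASK = (1 << 64) - 1

-- shift amounts in Source B are always nonnegative ints; Lean's <<< / >>> take the Nat .toNat, exact here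
def pvScatterB (cs : List Char) : List (List Int) :=
  (PySem.List.enumerate cs 0).foldl (fun L p =>
      if p.2 = '1' then
        pvSet2 L (PySem.Int.mod p.1 5) (PySem.Int.mod (PySem.Int.floordiv p.1 5) 5)
          (PySem.Int.bor (pvGet2 L (PySem.Int.mod p.1 5) (PySem.Int.mod (PySem.Int.floordiv p.1 5) 5))
            ((1 : Int) <<< (PySem.Int.floordiv p.1 25).toNat))
      else L)
    ((PySem.List.pyRange 0 5 1).map (fun _ => List.replicate 5 (0 : Int)))

-- C = [lanes[x][0] ^ ... ^ lanes[x][4] for x in range(5)]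
def pvLanesC (L : List (List Int)) : List Int :=
  (PySem.List.pyRange 0 5 1).map (fun x =>
    PySem.Int.bxor (PySem.Int.bxor (PySem.Int.bxor (PySem.Int.bxor
      (pvGet2 L x 0) (pvGet2 L x 1)) (pvGet2 L x 2)) (pvGet2 L x 3)) (pvGet2 L x 4))

-- one iteration of Source B's round loop on the pair (E, C): D, then E, then C comprehensions
def pvRoundB (p : List Int × List Int) : List Int × List Int :=
  let D := (PySem.List.pyRange 0 5 1).map (fun x =>
    PySem.Int.bxor (PySem.List.pyGetD p.2 (PySem.Int.mod (x - 1) 5) 0)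
      (PySem.Int.band (PySem.Int.bor ((PySem.List.pyGetD p.2 (PySem.Int.mod (x + 1) 5) 0) <<< 1)
        ((PySem.List.pyGetD p.2 (PySem.Int.mod (x + 1) 5) 0) >>> 63)) pvMask))
  ((PySem.List.pyRange 0 5 1).map (fun x =>
      PySem.Int.bxor (PySem.List.pyGetD p.1 x 0) (PySem.List.pyGetD D x 0)),
   (PySem.List.pyRange 0 5 1).map (fun x =>
      PySem.Int.bxor (PySem.List.pyGetD p.2 x 0) (PySem.List.pyGetD D x 0)))

-- ''.join(str(((lanes[x][y] ^ E[x]) >> z) & 1) ...)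
def pvSerialB (L : List (List Int)) (E : List Int) : List Char :=
  PySem.Chars.join [] ((PySem.List.pyRange 0 5 1).flatMap (fun x =>
    (PySem.List.pyRange 0 5 1).flatMap (fun y =>
      (PySem.List.pyRange 0 64 1).map (fun z =>
        PySem.Int.toChars (PySem.Int.band
          ((PySem.Int.bxor (pvGet2 L x y) (PySem.List.pyGetD E x 0)) >>> z.toNat) 1)))))

def permutation_function_alt (S : String) : String :=
  let L := pvScatterB (pvBits S)
  let p := (PySem.List.pyRange 0 24 1).foldl (fun p _ => pvRoundB p)
             (List.replicate 5 (0 : Int), pvLanesC L)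
  pvFormat (pvSerialB L p.1)

-- ===== PRECONDITION & SPEC =====

-- Pre_ is exactly where A returns: S must parse as a Python base-16 int literal (else
-- int(S,16) raises ValueError), with value nonnegative (for a negative value the enumerated
-- binary string contains non-digit characters and int(bit) raises ValueError) and value
-- below 2^1600 (else the binary string overflows the 5×5×64 grid and A raises IndexError).
def Pre_permutation_function (S : String) : Prop :=
  (PySem.Int.ofStrBase? S 16).isSome = true ∧
    0 ≤ (PySem.Int.ofStrBase? S 16).getD 0 ∧
      (PySem.Int.ofStrBase? S 16).getD 0 < 44462416477094044620016814065517364315819234512137839319418223093753683069769152238984782576173969417485953521141049383745107056455283979316385016701612810119562585078620415976730705698345087039035930761275083827265405596065418173652685035788898113991627042329246850314029877161622487411877779578892097029690461532001915311366862468942148892205997883828265721290296220249202674740669814705818564765009960300389641843321936008416473775144511929246788246559538970957296160626364645376  -- = 2 ^ 1600 (written out so `decide` need not unfold the power)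
instance (S : String) : Decidable (Pre_permutation_function S) := by
  unfold Pre_permutation_function; infer_instance

def pvWitness_permutation_function : String := "3f"

def Spec_permutation_function (S : String) (out : String) : Prop := out = permutation_function_alt S
instance (S : String) (out : String) : Decidable (Spec_permutation_function S out) := by
  unfold Spec_permutation_function; infer_instance

-- ===== CLAIM (what is proved, stated in full; the proofs are below) =====
def Claim_equal_permutation_function : Prop :=
  ∀ (S : String), Dom_permutation_function S → Pre_permutation_function S →
    Spec_permutation_function S (permutation_function S)

-- ===== LEMMAS AND PROOFS =====

-- proof-side views -----------------------------------------------------------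

def pvB2I (b : Bool) : Int := if b then 1 else 0

def pvShape3 (A : List (List (List Int))) : Prop :=
  A.length = 5 ∧ ∀ c ∈ A, c.length = 5 ∧ ∀ l ∈ c, l.length = 64

def pvShapeR (m k : Nat) (L : List (List Int)) : Prop :=
  L.length = m ∧ ∀ r ∈ L, r.length = k

def pvLanesRep (L : List (List Int)) (M : Nat → Nat → Nat) : Prop :=
  pvShapeR 5 5 L ∧ ∀ x y : Nat, x < 5 → y < 5 → pvGet2 L ↑x ↑y = ↑(M x y) ∧ M x y < 2 ^ 64

-- Nat-level theta ingredients
def pvCN (M : Nat → Nat → Nat) (x : Nat) : Nat :=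
  ((((M x 0 ^^^ M x 1) ^^^ M x 2) ^^^ M x 3) ^^^ M x 4)
def pvRotN (c : Nat) : Nat := ((c <<< 1) ||| (c >>> 63)) &&& (2 ^ 64 - 1)
def pvDF (C : Nat → Nat) (x : Nat) : Nat :=
  C ((x + 4) % 5) ^^^ pvRotN (C ((x + 1) % 5))

-- Nat-level model of B's round loop: E accumulates the D's, C evolves autonomously
def pvIterP (C0 : Nat → Nat) : Nat → ((Nat → Nat) × (Nat → Nat))
  | 0 => (fun _ => 0, C0)
  | n + 1 =>
    (fun x => (pvIterP C0 n).1 x ^^^ pvDF (pvIterP C0 n).2 x,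
     fun x => (pvIterP C0 n).2 x ^^^ pvDF (pvIterP C0 n).2 x)

-- grid invariant: G's bits are the bits of the lane model M
def pvInvG (G : List (List (List Int))) (M : Nat → Nat → Nat) : Prop :=
  pvShape3 G ∧ (∀ x y : Nat, x < 5 → y < 5 → M x y < 2 ^ 64) ∧
    ∀ x y z : Nat, x < 5 → y < 5 → z < 64 → pvGet3 G ↑x ↑y ↑z = pvB2I ((M x y).testBit z)

-- representation of a 5-element int list by a Nat function
def pvERep (l : List Int) (F : Nat → Nat) : Prop :=
  ∀ x : Nat, x < 5 → PySem.List.pyGetD l ↑x 0 = ↑(F x)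

-- Int-level column parity of the grid
def pvCfun (G : List (List (List Int))) (x z : Nat) : Int :=
  PySem.Int.bxor (PySem.Int.bxor (PySem.Int.bxor (PySem.Int.bxor
    (pvGet3 G ↑x ↑0 ↑z) (pvGet3 G ↑x ↑1 ↑z)) (pvGet3 G ↑x ↑2 ↑z)) (pvGet3 G ↑x ↑3 ↑z)) (pvGet3 G ↑x ↑4 ↑z)

-- basic list lemmas ----------------------------------------------------------

theorem pv_getD_set {α : Type} (l : List α) (n m : Nat) (v : α) (d : α) (hn : n < l.length) :
    (l.set n v).getD m d = if m = n then v else l.getD m d := by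
  simp only [List.getD, List.getElem?_set]
  rcases eq_or_ne m n with rfl | hne
  · simp [hn]
  · simp [hne, Ne.symm hne]

theorem pv_getD_len {α : Type} {m' : Nat} {m : Nat} {L : List (List α)} {x : Nat}
    (hlen : L.length = m) (hmem : ∀ r ∈ L, r.length = m') (hx : x < m) :
    (L.getD x []).length = m' := by
  rw [List.getD_eq_getElem L [] (by omega)]; exact hmem _ (List.getElem_mem _)

theorem pv_getD_mem {α : Type} (L : List (List α)) (i : Nat) (hi : i < L.length) :
    L.getD i [] ∈ L := by
  rw [List.getD_eq_getElem L [] hi]; exact List.getElem_mem _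

theorem pvGet2_pvSet2 (L : List (List Int)) {m k : Nat} (hL : pvShapeR m k L)
    (x z x' z' : Nat) (hx : x < m) (hz : z < k) (hx' : x' < m) (hz' : z' < k) (v : Int) :
    pvGet2 (pvSet2 L ↑x ↑z v) ↑x' ↑z' = if x' = x ∧ z' = z then v else pvGet2 L ↑x' ↑z' := by
  obtain ⟨h1, h2⟩ := hL
  simp only [pvGet2, pvSet2, PySem.List.pyGetD_natCast, PySem.List.pySetD_natCast]
  rw [pv_getD_set _ _ _ _ _ (by omega)]
  by_cases hne : x' = x
  · subst hne
    rw [if_pos rfl, pv_getD_set _ _ _ _ _ (by rw [pv_getD_len h1 h2 hx]; omega)]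
    by_cases hz2 : z' = z <;> simp [hz2]
  · simp [hne]

theorem pvShapeR_pvSet2 (L : List (List Int)) {m k : Nat} (hL : pvShapeR m k L)
    (x z : Nat) (hx : x < m) (v : Int) : pvShapeR m k (pvSet2 L ↑x ↑z v) := by
  obtain ⟨h1, h2⟩ := hL
  simp only [pvSet2, PySem.List.pySetD_natCast, PySem.List.pyGetD_natCast]
  refine ⟨by simpa using h1, ?_⟩
  intro r hr
  rcases List.mem_or_eq_of_mem_set hr with hr | rfl
  · exact h2 _ hr
  · simpa using h2 _ (pv_getD_mem L x (by omega))

theorem pvGet3_pvSet3 (A : List (List (List Int))) (hA : pvShape3 A)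
    (x y z x' y' z' : Nat) (hx : x < 5) (hy : y < 5) (hz : z < 64)
    (hx' : x' < 5) (hy' : y' < 5) (hz' : z' < 64) (v : Int) :
    pvGet3 (pvSet3 A ↑x ↑y ↑z v) ↑x' ↑y' ↑z' =
      if x' = x ∧ y' = y ∧ z' = z then v else pvGet3 A ↑x' ↑y' ↑z' := by
  obtain ⟨h1, h2⟩ := hA
  simp only [pvGet3, pvSet3, PySem.List.pyGetD_natCast, PySem.List.pySetD_natCast]
  have hx5 : x < A.length := by omega
  have hrow : (A.getD x []).length = 5 := pv_getD_len h1 (fun r hr => (h2 r hr).1) hx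
  have hlane : ((A.getD x []).getD y []).length = 64 :=
    pv_getD_len hrow (fun l hl => (h2 _ (pv_getD_mem A x hx5)).2 l hl) hy
  rw [pv_getD_set _ _ _ _ _ (by omega)]
  by_cases hne : x' = x
  · subst hne
    rw [if_pos rfl, pv_getD_set _ _ _ _ _ (by rw [hrow]; omega)]
    by_cases hy2 : y' = y
    · subst hy2
      rw [if_pos rfl, pv_getD_set _ _ _ _ _ (by rw [hlane]; omega)]
      by_cases hz2 : z' = z <;> simp [hz2]
    · simp [hy2]
  · simp [hne]

theorem pvShape3_pvSet3 (A : List (List (List Int))) (hA : pvShape3 A)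
    (x y z : Nat) (hx : x < 5) (hy : y < 5) (v : Int) : pvShape3 (pvSet3 A ↑x ↑y ↑z v) := by
  obtain ⟨h1, h2⟩ := hA
  simp only [pvSet3, PySem.List.pySetD_natCast, PySem.List.pyGetD_natCast]
  refine ⟨by simpa using h1, ?_⟩
  intro c hc
  have hmem : A.getD x [] ∈ A := pv_getD_mem A x (by omega)
  obtain ⟨hc5, hc64⟩ := h2 _ hmem
  rcases List.mem_or_eq_of_mem_set hc with hc | rfl
  · exact h2 _ hc
  · refine ⟨by simpa using hc5, ?_⟩
    intro l hl
    rcases List.mem_or_eq_of_mem_set hl with hl | rfl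
    · exact hc64 _ hl
    · simpa using hc64 _ (pv_getD_mem _ y (by omega))

-- generic "fold of writes over range n" lemmas --------------------------------

theorem pv_foldl_write3 (st : List (List (List Int)) → Int → List (List (List Int)))
    (W : Nat → Nat → Nat → Nat → Bool) (val : Nat → Nat → Nat → Int) (N : Int) (n : Nat)
    (hN : N = ↑n)
    (hst : ∀ s (i : Nat), i < n → pvShape3 s → pvShape3 (st s ↑i) ∧
      ∀ x y z : Nat, x < 5 → y < 5 → z < 64 →
        pvGet3 (st s ↑i) ↑x ↑y ↑z = if W i x y z then val x y z else pvGet3 s ↑x ↑y ↑z)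
    (s0 : List (List (List Int))) (hs0 : pvShape3 s0) :
    pvShape3 ((PySem.List.pyRange 0 N 1).foldl st s0) ∧
      ∀ x y z : Nat, x < 5 → y < 5 → z < 64 →
        pvGet3 ((PySem.List.pyRange 0 N 1).foldl st s0) ↑x ↑y ↑z =
          if (List.range n).any (fun i => W i x y z) then val x y z else pvGet3 s0 ↑x ↑y ↑z := by
  subst hN
  induction n with
  | zero =>
    rw [PySem.List.pyRange_one_eq_nil (by omega)]
    simpa using hs0
  | succ n ih =>
    obtain ⟨ihs, ihg⟩ := ih (fun s i hi hs => hst s i (by omega) hs)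
    have hsplit : PySem.List.pyRange 0 ((n : Int) + 1) 1 =
        PySem.List.pyRange 0 (n : Int) 1 ++ [(n : Int)] :=
      PySem.List.pyRange_one_succ_right (by omega)
    rw [show ((n + 1 : Nat) : Int) = (n : Int) + 1 by push_cast; ring, hsplit,
      List.foldl_append, List.foldl_cons, List.foldl_nil]
    obtain ⟨hs', hg'⟩ := hst _ n (by omega) ihs
    refine ⟨hs', ?_⟩
    intro x y z hx hy hz
    rw [hg' x y z hx hy hz, ihg x y z hx hy hz, List.range_succ, List.any_append]
    by_cases hW : W n x y z <;> by_cases hA : (List.range n).any (fun i => W i x y z) <;>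
      simp [hW, hA]

theorem pv_foldl_write2 {m k : Nat} (st : List (List Int) → Int → List (List Int))
    (W : Nat → Nat → Nat → Bool) (val : Nat → Nat → Int) (N : Int) (n : Nat)
    (hN : N = ↑n)
    (hst : ∀ s (i : Nat), i < n → pvShapeR m k s → pvShapeR m k (st s ↑i) ∧
      ∀ x z : Nat, x < m → z < k →
        pvGet2 (st s ↑i) ↑x ↑z = if W i x z then val x z else pvGet2 s ↑x ↑z)
    (s0 : List (List Int)) (hs0 : pvShapeR m k s0) :
    pvShapeR m k ((PySem.List.pyRange 0 N 1).foldl st s0) ∧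
      ∀ x z : Nat, x < m → z < k →
        pvGet2 ((PySem.List.pyRange 0 N 1).foldl st s0) ↑x ↑z =
          if (List.range n).any (fun i => W i x z) then val x z else pvGet2 s0 ↑x ↑z := by
  subst hN
  induction n with
  | zero =>
    rw [PySem.List.pyRange_one_eq_nil (by omega)]
    simpa using hs0
  | succ n ih =>
    obtain ⟨ihs, ihg⟩ := ih (fun s i hi hs => hst s i (by omega) hs)
    have hsplit : PySem.List.pyRange 0 ((n : Int) + 1) 1 =
        PySem.List.pyRange 0 (n : Int) 1 ++ [(n : Int)] :=
      PySem.List.pyRange_one_succ_right (by omega)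
    rw [show ((n + 1 : Nat) : Int) = (n : Int) + 1 by push_cast; ring, hsplit,
      List.foldl_append, List.foldl_cons, List.foldl_nil]
    obtain ⟨hs', hg'⟩ := hst _ n (by omega) ihs
    refine ⟨hs', ?_⟩
    intro x z hx hz
    rw [hg' x z hx hz, ihg x z hx hz, List.range_succ, List.any_append]
    by_cases hW : W n x z <;> by_cases hA : (List.range n).any (fun i => W i x z) <;>
      simp [hW, hA]

-- scatter characterizations ---------------------------------------------------

theorem pv_any_range_eq (n j : Nat) :
    ((List.range n).any (fun i => decide (i = j))) = decide (j < n) := by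
  by_cases h : j < n
  · simp only [h, decide_true, List.any_eq_true]
    exact ⟨j, by simp [List.mem_range, h]⟩
  · simp only [h, decide_false, List.any_eq_false]
    intro i hi
    simp only [List.mem_range] at hi
    simp only [decide_eq_true_eq]
    omega

theorem pv_mod5_cast (i : Nat) : PySem.Int.mod (↑i) 5 = ((i % 5 : Nat) : Int) := by
  rw [PySem.Int.mod_eq_emod_of_pos (by omega)]; omega

theorem pv_fdiv5_cast (i : Nat) : PySem.Int.floordiv (↑i) 5 = ((i / 5 : Nat) : Int) := by
  rw [PySem.Int.floordiv_eq_ediv_of_pos (by omega)]; omega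

theorem pv_fdiv25_cast (i : Nat) : PySem.Int.floordiv (↑i) 25 = ((i / 25 : Nat) : Int) := by
  rw [PySem.Int.floordiv_eq_ediv_of_pos (by omega)]; omega

theorem pv_modm1_5_cast (x : Nat) : PySem.Int.mod ((↑x) - 1) 5 = (((x + 4) % 5 : Nat) : Int) := by
  rw [PySem.Int.mod_eq_emod_of_pos (by omega)]; omega

theorem pv_modp1_5_cast (x : Nat) : PySem.Int.mod ((↑x) + 1) 5 = (((x + 1) % 5 : Nat) : Int) := by
  rw [PySem.Int.mod_eq_emod_of_pos (by omega)]; omega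

theorem pv_modm1_64_cast (z : Nat) : PySem.Int.mod ((↑z) - 1) 64 = (((z + 63) % 64 : Nat) : Int) := by
  rw [PySem.Int.mod_eq_emod_of_pos (by omega)]; omega

theorem pv_grid0_spec :
    pvShape3 ((PySem.List.pyRange 0 5 1).map (fun _ => (PySem.List.pyRange 0 5 1).map (fun _ =>
      (PySem.List.pyRange 0 64 1).map (fun _ => (0 : Int))))) ∧
    ∀ x y z : Nat, x < 5 → y < 5 → z < 64 →
      pvGet3 ((PySem.List.pyRange 0 5 1).map (fun _ => (PySem.List.pyRange 0 5 1).map (fun _ =>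
        (PySem.List.pyRange 0 64 1).map (fun _ => (0 : Int))))) ↑x ↑y ↑z = 0 := by
  have h5 : (PySem.List.pyRange 0 5 1).length = 5 := rfl
  have h64 : (PySem.List.pyRange 0 64 1).length = 64 := rfl
  rw [List.map_const', List.map_const', List.map_const', h5, h64]
  constructor
  · refine ⟨by simp, ?_⟩
    intro c hc
    rw [List.eq_of_mem_replicate hc]
    refine ⟨by simp, ?_⟩
    intro l hl
    rw [List.eq_of_mem_replicate hl]
    simp
  · intro x y z hx hy hz
    simp only [pvGet3, PySem.List.pyGetD_natCast]
    rw [List.getD_replicate _ (by simpa using hx), List.getD_replicate _ (by simpa using hy),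
      List.getD_replicate _ (by simpa using hz)]

set_option maxHeartbeats 1000000 in
theorem pvScatterA_spec (cs : List Char) (hlen : cs.length ≤ 1600) :
    pvShape3 (pvScatterA cs) ∧ ∀ x y z : Nat, x < 5 → y < 5 → z < 64 →
      pvGet3 (pvScatterA cs) ↑x ↑y ↑z =
        if x + 5 * y + 25 * z < cs.length then (PySem.Int.ofChars? [cs.getD (x + 5 * y + 25 * z) ' ']).getD 0
        else 0 := by
  obtain ⟨hg0s, hg0⟩ := pv_grid0_spec
  unfold pvScatterA
  rw [PySem.List.enumerate_eq_map_pyRange (d := ' '), List.foldl_map]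
  simp only [PySem.List.len_eq]
  obtain ⟨hs, hg⟩ := pv_foldl_write3
    (fun A j => pvSet3 A (PySem.Int.mod j 5) (PySem.Int.mod (PySem.Int.floordiv j 5) 5)
        (PySem.Int.floordiv j 25) ((PySem.Int.ofChars? [PySem.List.pyGetD cs j ' ']).getD 0))
    (fun i x y z => decide (i = x + 5 * y + 25 * z))
    (fun x y z => (PySem.Int.ofChars? [cs.getD (x + 5 * y + 25 * z) ' ']).getD 0)
    (↑cs.length) cs.length rfl
    (by
      intro s i hi hshape
      dsimp only
      rw [pv_mod5_cast i, pv_fdiv5_cast i, pv_mod5_cast (i / 5), pv_fdiv25_cast i]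
      simp only [PySem.List.pyGetD_natCast]
      constructor
      · exact pvShape3_pvSet3 _ hshape _ _ _ (by omega) (by omega) _
      · intro x y z hx hy hz
        rw [pvGet3_pvSet3 _ hshape _ _ _ _ _ _ (by omega) (by omega) (by omega) hx hy hz]
        have hiff : (x = i % 5 ∧ y = i / 5 % 5 ∧ z = i / 25) ↔ i = x + 5 * y + 25 * z := by
          constructor
          · rintro ⟨rfl, rfl, rfl⟩; omega
          · rintro rfl; omega
        by_cases hcase : i = x + 5 * y + 25 * z
        · rw [if_pos (hiff.mpr hcase), if_pos (by simpa using hcase), hcase]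
        · rw [if_neg (fun hcon => hcase (hiff.mp hcon)), if_neg (by simpa using hcase)])
    _ (by exact ⟨hg0s.1, hg0s.2⟩)
  refine ⟨hs, ?_⟩
  intro x y z hx hy hz
  rw [hg x y z hx hy hz]
  simp only [pv_any_range_eq]
  by_cases h : x + 5 * y + 25 * z < cs.length
  · rw [if_pos (by simpa using h), if_pos h]
  · rw [if_neg (by simpa using h), hg0 x y z hx hy hz, if_neg h]

theorem pv_lanes0_spec :
    pvLanesRep ((PySem.List.pyRange 0 5 1).map (fun _ => List.replicate 5 (0 : Int))) (fun _ _ => 0) := by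
  have h5 : (PySem.List.pyRange 0 5 1).length = 5 := rfl
  rw [List.map_const', h5]
  refine ⟨⟨by simp, ?_⟩, ?_⟩
  · intro r hr
    rw [List.eq_of_mem_replicate hr]
    simp
  · intro x y hx hy
    simp only [pvGet2, PySem.List.pyGetD_natCast]
    rw [List.getD_replicate _ (by simpa using hx), List.getD_replicate _ (by simpa using hy)]
    simp

theorem pv_testBit_one_shiftLeft (i j : Nat) : (1 <<< i).testBit j = decide (j = i) := by
  rw [Nat.testBit_shiftLeft]
  have h1 : ∀ k, Nat.testBit 1 k = decide (k = 0) := by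
    intro k
    rcases k with _ | k <;> simp [Nat.testBit_succ]
  rw [h1]
  rcases Nat.lt_or_ge j i with h | h
  · simp [Nat.not_le_of_lt h]
    omega
  · simp [h]
    omega

theorem pv_int_one_shiftLeft (k : Nat) : ((1 : Int) <<< k) = ((1 <<< k : Nat) : Int) :=
  Int.mem_toNat?.mp rfl

set_option maxHeartbeats 1000000 in
theorem pvScatterB_spec (cs : List Char) (hlen : cs.length ≤ 1600) :
    ∃ M : Nat → Nat → Nat, pvLanesRep (pvScatterB cs) M ∧
      ∀ x y z : Nat, x < 5 → y < 5 → z < 64 →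
        (M x y).testBit z = decide (x + 5 * y + 25 * z < cs.length ∧ cs.getD (x + 5 * y + 25 * z) ' ' = '1') := by
  unfold pvScatterB
  rw [PySem.List.enumerate_eq_map_pyRange (d := ' '), List.foldl_map]
  simp only [PySem.List.len_eq]
  suffices h : ∀ n : Nat, n ≤ cs.length →
      ∃ M : Nat → Nat → Nat,
        pvLanesRep ((PySem.List.pyRange 0 ↑n 1).foldl (fun L j =>
          if PySem.List.pyGetD cs j ' ' = '1' then
            pvSet2 L (PySem.Int.mod j 5) (PySem.Int.mod (PySem.Int.floordiv j 5) 5)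
              (PySem.Int.bor (pvGet2 L (PySem.Int.mod j 5) (PySem.Int.mod (PySem.Int.floordiv j 5) 5))
                ((1 : Int) <<< (PySem.Int.floordiv j 25).toNat))
          else L)
          ((PySem.List.pyRange 0 5 1).map (fun _ => List.replicate 5 (0 : Int)))) M ∧
        ∀ x y z : Nat, x < 5 → y < 5 → z < 64 →
          (M x y).testBit z = decide (x + 5 * y + 25 * z < n ∧ cs.getD (x + 5 * y + 25 * z) ' ' = '1') by
    exact h cs.length le_rfl
  intro n hn
  induction n with
  | zero =>
    refine ⟨fun _ _ => 0, ?_, ?_⟩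
    · have h0 : PySem.List.pyRange 0 ((0 : Nat) : Int) 1 = [] :=
        PySem.List.pyRange_one_eq_nil (by simp)
      rw [h0, List.foldl_nil]
      exact pv_lanes0_spec
    · intro x y z _ _ _
      simp
  | succ n ih =>
    obtain ⟨M, hrep, hbit⟩ := ih (by omega)
    have hsplit : PySem.List.pyRange 0 ((n : Int) + 1) 1 =
        PySem.List.pyRange 0 (n : Int) 1 ++ [(n : Int)] :=
      PySem.List.pyRange_one_succ_right (by omega)
    rw [show ((n + 1 : Nat) : Int) = (n : Int) + 1 by push_cast; ring, hsplit,
      List.foldl_append, List.foldl_cons, List.foldl_nil]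
    rw [pv_mod5_cast n, pv_fdiv5_cast n, pv_mod5_cast (n / 5), pv_fdiv25_cast n]
    simp only [PySem.List.pyGetD_natCast, Int.toNat_natCast]
    by_cases hc : cs.getD n ' ' = '1'
    · rw [if_pos hc]
      refine ⟨fun x y => if x = n % 5 ∧ y = n / 5 % 5 then M (n % 5) (n / 5 % 5) ||| (1 <<< (n / 25)) else M x y,
        ⟨?_, ?_⟩, ?_⟩
      · exact pvShapeR_pvSet2 _ hrep.1 _ _ (by omega) _
      · intro x y hx hy
        dsimp only
        rw [pvGet2_pvSet2 _ hrep.1 _ _ _ _ (by omega) (by omega) hx hy]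
        by_cases hxy : x = n % 5 ∧ y = n / 5 % 5
        · rw [if_pos hxy, if_pos hxy, (hrep.2 _ _ (by omega) (by omega)).1, pv_int_one_shiftLeft,
            PySem.Int.bor_natCast]
          refine ⟨rfl, Nat.or_lt_two_pow (hrep.2 _ _ (by omega) (by omega)).2 ?_⟩
          rw [Nat.one_shiftLeft]
          exact Nat.pow_lt_pow_right (by omega) (by omega)
        · rw [if_neg hxy, if_neg hxy]
          exact hrep.2 _ _ hx hy
      · intro x y z hx hy hz
        dsimp only
        by_cases hxy : x = n % 5 ∧ y = n / 5 % 5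
        · obtain ⟨rfl, rfl⟩ := hxy
          rw [if_pos ⟨rfl, rfl⟩, Nat.testBit_or, pv_testBit_one_shiftLeft,
            hbit _ _ z (by omega) (by omega) hz]
          by_cases hzz : z = n / 25
          · subst hzz
            have hidx : n % 5 + 5 * (n / 5 % 5) + 25 * (n / 25) = n := by omega
            rw [hidx]
            have hc' : cs[n]?.getD ' ' = '1' := hc
            simp [hc']
          · have hidx : n % 5 + 5 * (n / 5 % 5) + 25 * z ≠ n := by omega
            simp only [hzz, decide_false, Bool.or_false, decide_eq_decide]
            constructor <;> rintro ⟨h1, h2⟩ <;> exact ⟨by omega, h2⟩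
        · rw [if_neg hxy, hbit x y z hx hy hz]
          have hne : x + 5 * y + 25 * z ≠ n := by
            intro hcon
            exact hxy ⟨by omega, by omega⟩
          simp only [decide_eq_decide]
          constructor <;> rintro ⟨h1, h2⟩ <;> exact ⟨by omega, h2⟩
    · rw [if_neg hc]
      refine ⟨M, hrep, ?_⟩
      intro x y z hx hy hz
      rw [hbit x y z hx hy hz]
      by_cases hEq : x + 5 * y + 25 * z = n
      · have hc' : ¬ cs[n]?.getD ' ' = '1' := hc
        simp [hEq, hc']
      · simp only [decide_eq_decide]
        constructor <;> rintro ⟨h1, h2⟩ <;> exact ⟨by omega, h2⟩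

-- theta characterizations -----------------------------------------------------

theorem pv_any_range_eq' (n j : Nat) :
    ((List.range n).any (fun i => decide (j = i))) = decide (j < n) := by
  have h : (fun i => decide (j = i)) = (fun i => decide (i = j)) := by
    funext i
    simp [eq_comm]
  rw [h, pv_any_range_eq]

theorem pv_any_range_last (n j : Nat) (b : Bool) (hj : j < n) :
    ((List.range n).any (fun k => b && decide (j = k))) = b := by
  cases b
  · simp
  · simp only [Bool.true_and, List.any_eq_true]
    exact ⟨j, by simp [List.mem_range, hj]⟩

theorem pvThetaB0_spec (G : List (List (List Int))) :
    pvShape3 (pvThetaB0 G) ∧ ∀ x y z : Nat, x < 5 → y < 5 → z < 64 →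
      pvGet3 (pvThetaB0 G) ↑x ↑y ↑z = pvGet3 G ↑x ↑y ↑z := by
  constructor
  · refine ⟨by simp [pvThetaB0, PySem.List.length_pyRange_one], ?_⟩
    intro c hc
    simp only [pvThetaB0, List.mem_map] at hc
    obtain ⟨x, _, rfl⟩ := hc
    refine ⟨by simp [PySem.List.length_pyRange_one], ?_⟩
    intro l hl
    simp only [List.mem_map] at hl
    obtain ⟨y, _, rfl⟩ := hl
    simp [PySem.List.length_pyRange_one]
  · intro x y z hx hy hz
    show PySem.List.pyGetD (PySem.List.pyGetD (PySem.List.pyGetD (pvThetaB0 G) ↑x []) ↑y []) ↑z 0 = _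
    unfold pvThetaB0
    rw [PySem.List.pyGetD_map_pyRange_of_nonneg _ 5 ↑x [] (by omega) (by exact_mod_cast hx),
      PySem.List.pyGetD_map_pyRange_of_nonneg _ 5 ↑y [] (by omega) (by exact_mod_cast hy),
      PySem.List.pyGetD_map_pyRange_of_nonneg _ 64 ↑z 0 (by omega) (by exact_mod_cast hz)]

theorem pvCinit_spec :
    pvShapeR 5 64 ((PySem.List.pyRange 0 5 1).map (fun _ => List.replicate 64 (0 : Int))) ∧
    ∀ x z : Nat, x < 5 → z < 64 →
      pvGet2 ((PySem.List.pyRange 0 5 1).map (fun _ => List.replicate 64 (0 : Int))) ↑x ↑z = 0 := by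
  have h5 : (PySem.List.pyRange 0 5 1).length = 5 := rfl
  rw [List.map_const', h5]
  constructor
  · refine ⟨by simp, ?_⟩
    intro r hr
    rw [List.eq_of_mem_replicate hr]
    simp
  · intro x z hx hz
    simp only [pvGet2, PySem.List.pyGetD_natCast]
    rw [List.getD_replicate _ (by simpa using hx), List.getD_replicate _ (by simpa using hz)]

theorem pvThetaC_spec (G : List (List (List Int))) :
    pvShapeR 5 64 (pvThetaC G) ∧ ∀ x z : Nat, x < 5 → z < 64 →
      pvGet2 (pvThetaC G) ↑x ↑z = pvCfun G x z := by
  obtain ⟨hi, hi0⟩ := pvCinit_spec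
  unfold pvThetaC
  obtain ⟨hs, hg⟩ := pv_foldl_write2 (m := 5) (k := 64)
    (fun C x => (PySem.List.pyRange 0 64 1).foldl (fun C z =>
      pvSet2 C x z (PySem.Int.bxor (PySem.Int.bxor (PySem.Int.bxor (PySem.Int.bxor
        (pvGet3 G x 0 z) (pvGet3 G x 1 z)) (pvGet3 G x 2 z)) (pvGet3 G x 3 z)) (pvGet3 G x 4 z))) C)
    (fun i x z => decide (x = i)) (fun x z => pvCfun G x z) 5 5 (by norm_num)
    (by
      intro s i hi5 hsh
      dsimp only
      obtain ⟨hs', hg'⟩ := pv_foldl_write2 (m := 5) (k := 64)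
        (fun C z => pvSet2 C ↑i z (PySem.Int.bxor (PySem.Int.bxor (PySem.Int.bxor (PySem.Int.bxor
          (pvGet3 G ↑i 0 z) (pvGet3 G ↑i 1 z)) (pvGet3 G ↑i 2 z)) (pvGet3 G ↑i 3 z)) (pvGet3 G ↑i 4 z)))
        (fun j x z => decide (x = i) && decide (z = j)) (fun x z => pvCfun G x z) 64 64 (by norm_num)
        (by
          intro s' j hj hsh'
          dsimp only
          constructor
          · exact pvShapeR_pvSet2 _ hsh' _ _ hi5 _
          · intro x z hx hz
            rw [pvGet2_pvSet2 _ hsh' _ _ _ _ hi5 hj hx hz]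
            by_cases h1 : x = i <;> by_cases h2 : z = j <;> simp [h1, h2, pvCfun])
        s hsh
      constructor
      · exact hs'
      · intro x z hx hz
        rw [hg' x z hx hz]
        by_cases h1 : x = i
        · rw [pv_any_range_last 64 z _ hz]
        · simp [h1])
    _ hi
  refine ⟨hs, ?_⟩
  intro x z hx hz
  rw [hg x z hx hz, pv_any_range_eq' 5 x]
  simp [hx]

theorem pvThetaBody_spec (G : List (List (List Int))) (C : List (List Int))
    (hG : pvShape3 G) (hC : pvShapeR 5 64 C) :
    pvShape3 (pvThetaBody G C) ∧ ∀ x y z : Nat, x < 5 → y < 5 → z < 64 →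
      pvGet3 (pvThetaBody G C) ↑x ↑y ↑z =
        PySem.Int.bxor (PySem.Int.bxor (pvGet3 G ↑x ↑y ↑z)
          (pvGet2 C ↑((x + 4) % 5) ↑z)) (pvGet2 C ↑((x + 1) % 5) ↑((z + 63) % 64)) := by
  obtain ⟨hb0, hb0g⟩ := pvThetaB0_spec G
  unfold pvThetaBody
  obtain ⟨hs, hg⟩ := pv_foldl_write3
    (fun B x => (PySem.List.pyRange 0 5 1).foldl (fun B y =>
      (PySem.List.pyRange 0 64 1).foldl (fun B z =>
        pvSet3 B x y z (PySem.Int.bxor (PySem.Int.bxor (pvGet3 G x y z)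
          (pvGet2 C (PySem.Int.mod (x - 1) 5) z))
          (pvGet2 C (PySem.Int.mod (x + 1) 5) (PySem.Int.mod (z - 1) 64)))) B) B)
    (fun i x y z => decide (x = i))
    (fun x y z => PySem.Int.bxor (PySem.Int.bxor (pvGet3 G ↑x ↑y ↑z)
      (pvGet2 C ↑((x + 4) % 5) ↑z)) (pvGet2 C ↑((x + 1) % 5) ↑((z + 63) % 64)))
    5 5 (by norm_num)
    (by
      intro s i hi5 hsh
      dsimp only
      obtain ⟨hs', hg'⟩ := pv_foldl_write3
        (fun B y => (PySem.List.pyRange 0 64 1).foldl (fun B z =>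
          pvSet3 B ↑i y z (PySem.Int.bxor (PySem.Int.bxor (pvGet3 G ↑i y z)
            (pvGet2 C (PySem.Int.mod (↑i - 1) 5) z))
            (pvGet2 C (PySem.Int.mod (↑i + 1) 5) (PySem.Int.mod (z - 1) 64)))) B)
        (fun j x y z => decide (x = i) && decide (y = j))
        (fun x y z => PySem.Int.bxor (PySem.Int.bxor (pvGet3 G ↑x ↑y ↑z)
          (pvGet2 C ↑((x + 4) % 5) ↑z)) (pvGet2 C ↑((x + 1) % 5) ↑((z + 63) % 64)))
        5 5 (by norm_num)
        (by
          intro s' j hj hsh'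
          dsimp only
          obtain ⟨hs'', hg''⟩ := pv_foldl_write3
            (fun B z => pvSet3 B ↑i ↑j z (PySem.Int.bxor (PySem.Int.bxor (pvGet3 G ↑i ↑j z)
              (pvGet2 C (PySem.Int.mod (↑i - 1) 5) z))
              (pvGet2 C (PySem.Int.mod (↑i + 1) 5) (PySem.Int.mod (z - 1) 64))))
            (fun k x y z => decide (x = i) && decide (y = j) && decide (z = k))
            (fun x y z => PySem.Int.bxor (PySem.Int.bxor (pvGet3 G ↑x ↑y ↑z)
              (pvGet2 C ↑((x + 4) % 5) ↑z)) (pvGet2 C ↑((x + 1) % 5) ↑((z + 63) % 64)))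
            64 64 (by norm_num)
            (by
              intro s'' k hk hsh''
              dsimp only
              rw [pv_modm1_5_cast i, pv_modp1_5_cast i, pv_modm1_64_cast k]
              constructor
              · exact pvShape3_pvSet3 _ hsh'' _ _ _ hi5 hj _
              · intro x y z hx hy hz
                rw [pvGet3_pvSet3 _ hsh'' _ _ _ _ _ _ hi5 hj hk hx hy hz]
                by_cases h1 : x = i <;> by_cases h2 : y = j <;> by_cases h3 : z = k <;>
                  simp [h1, h2, h3])
            s' hsh'
          constructor
          · exact hs''
          · intro x y z hx hy hz
            rw [hg'' x y z hx hy hz, pv_any_range_last 64 z _ hz])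
        s hsh
      constructor
      · exact hs'
      · intro x y z hx hy hz
        rw [hg' x y z hx hy hz, pv_any_range_last 5 y _ hy])
    _ hb0
  refine ⟨hs, ?_⟩
  intro x y z hx hy hz
  rw [hg x y z hx hy hz, pv_any_range_eq' 5 x]
  simp [hx]

theorem pvTheta_spec (G : List (List (List Int))) (hG : pvShape3 G) :
    pvShape3 (pvTheta G) ∧ ∀ x y z : Nat, x < 5 → y < 5 → z < 64 →
      pvGet3 (pvTheta G) ↑x ↑y ↑z =
        PySem.Int.bxor (PySem.Int.bxor (pvGet3 G ↑x ↑y ↑z)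
          (pvCfun G ((x + 4) % 5) z)) (pvCfun G ((x + 1) % 5) ((z + 63) % 64)) := by
  obtain ⟨hCs, hCg⟩ := pvThetaC_spec G
  obtain ⟨hs, hg⟩ := pvThetaBody_spec G (pvThetaC G) hG hCs
  refine ⟨hs, ?_⟩
  intro x y z hx hy hz
  rw [show pvTheta G = pvThetaBody G (pvThetaC G) from rfl, hg x y z hx hy hz,
    hCg ((x + 4) % 5) z (by omega) hz, hCg ((x + 1) % 5) ((z + 63) % 64) (by omega) (by omega)]

set_option maxRecDepth 4096 in
theorem pv_int_shiftl1_cast (m : Nat) : ((m : Int) <<< (1 : Int)) = ((m <<< 1 : Nat) : Int) :=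
  Int.mem_toNat?.mp rfl

theorem pv_int_shiftr63_cast (m : Nat) : ((m : Int) >>> (63 : Int)) = ((m >>> 63 : Nat) : Int) :=
  Int.mem_toNat?.mp rfl

set_option maxRecDepth 8192 in
theorem pv_mask_cast : pvMask = ((2 ^ 64 - 1 : Nat) : Int) := by decide

theorem pv_CN_lt (M : Nat → Nat → Nat) (hM : ∀ x y : Nat, x < 5 → y < 5 → M x y < 2 ^ 64)
    (x : Nat) (hx : x < 5) : pvCN M x < 2 ^ 64 :=
  Nat.xor_lt_two_pow (Nat.xor_lt_two_pow (Nat.xor_lt_two_pow (Nat.xor_lt_two_pow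
    (hM x 0 hx (by omega)) (hM x 1 hx (by omega))) (hM x 2 hx (by omega)))
    (hM x 3 hx (by omega))) (hM x 4 hx (by omega))

theorem pv_rotN_lt (c : Nat) : pvRotN c < 2 ^ 64 :=
  lt_of_le_of_lt Nat.and_le_right (by omega)

theorem pv_testBit_rot (c z : Nat) (hc : c < 2 ^ 64) (hz : z < 64) :
    (pvRotN c).testBit z = c.testBit ((z + 63) % 64) := by
  unfold pvRotN
  rw [Nat.testBit_and, Nat.testBit_two_pow_sub_one, Nat.testBit_or, Nat.testBit_shiftLeft,
    Nat.testBit_shiftRight]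
  rcases Nat.eq_zero_or_pos z with rfl | hzpos
  · norm_num
  · have h1 : (z + 63) % 64 = z - 1 := by omega
    have h2 : c.testBit (63 + z) = false :=
      Nat.testBit_lt_two_pow (lt_of_lt_of_le hc (Nat.pow_le_pow_right (by omega) (by omega)))
    simp [h1, h2, hz]
    omega

set_option maxRecDepth 4096 in
theorem pv_bxor_b2i (a b : Bool) : PySem.Int.bxor (pvB2I a) (pvB2I b) = pvB2I (a ^^ b) := by
  cases a <;> cases b <;> decide

-- linearity: column parity of a per-column xor-shifted model -------------------

theorem pvCN_xor (M : Nat → Nat → Nat) (D : Nat → Nat) (x : Nat) :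
    pvCN (fun a b => M a b ^^^ D a) x = pvCN M x ^^^ D x := by
  apply Nat.eq_of_testBit_eq
  intro i
  simp only [pvCN, Nat.testBit_xor]
  cases (M x 0).testBit i <;> cases (M x 1).testBit i <;> cases (M x 2).testBit i <;>
    cases (M x 3).testBit i <;> cases (M x 4).testBit i <;> cases (D x).testBit i <;> rfl

theorem pvDF_congr {C C' : Nat → Nat} (h : ∀ x, C x = C' x) (x : Nat) :
    pvDF C x = pvDF C' x := by
  unfold pvDF
  rw [h, h]

theorem pvDF_lt (C : Nat → Nat) (hC : ∀ x, x < 5 → C x < 2 ^ 64) (x : Nat) (hx : x < 5) :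
    pvDF C x < 2 ^ 64 :=
  Nat.xor_lt_two_pow (hC _ (by omega)) (pv_rotN_lt _)

-- one theta step on the grid, in terms of the lane model ----------------------

theorem pvInvG_theta {G : List (List (List Int))} {M : Nat → Nat → Nat} (h : pvInvG G M) :
    pvInvG (pvTheta G) (fun x y => M x y ^^^ pvDF (pvCN M) x) := by
  obtain ⟨hsh, hlt, hbits⟩ := h
  have hcf : ∀ x z : Nat, x < 5 → z < 64 → pvCfun G x z = pvB2I ((pvCN M x).testBit z) := by
    intro x z hx hz
    have e0 := hbits x 0 z hx (by omega) hz
    have e1 := hbits x 1 z hx (by omega) hz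
    have e2 := hbits x 2 z hx (by omega) hz
    have e3 := hbits x 3 z hx (by omega) hz
    have e4 := hbits x 4 z hx (by omega) hz
    push_cast at e0 e1 e2 e3 e4
    unfold pvCfun
    rw [e0, e1, e2, e3, e4, pv_bxor_b2i, pv_bxor_b2i, pv_bxor_b2i, pv_bxor_b2i]
    unfold pvCN
    simp [Nat.testBit_xor]
  refine ⟨(pvTheta_spec G hsh).1, ?_, ?_⟩
  · intro x y hx hy
    exact Nat.xor_lt_two_pow (hlt x y hx hy) (pvDF_lt _ (fun a ha => pv_CN_lt M hlt a ha) x hx)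
  · intro x y z hx hy hz
    rw [(pvTheta_spec G hsh).2 x y z hx hy hz, hbits x y z hx hy hz,
      hcf ((x + 4) % 5) z (by omega) hz, hcf ((x + 1) % 5) ((z + 63) % 64) (by omega) (by omega),
      pv_bxor_b2i, pv_bxor_b2i]
    congr 1
    unfold pvDF
    rw [Nat.testBit_xor, Nat.testBit_xor,
      pv_testBit_rot _ z (pv_CN_lt M hlt _ (by omega)) hz]
    exact (Bool.xor_assoc _ _ _)

theorem pvInvG_congr {G : List (List (List Int))} {M M' : Nat → Nat → Nat}
    (h : ∀ x y : Nat, M x y = M' x y) (hG : pvInvG G M) : pvInvG G M' := by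
  obtain ⟨hsh, hlt, hbits⟩ := hG
  refine ⟨hsh, ?_, ?_⟩
  · intro x y hx hy
    rw [← h]
    exact hlt x y hx hy
  · intro x y z hx hy hz
    rw [← h]
    exact hbits x y z hx hy hz

-- the 24-round grid iteration tracked by the Nat-level parity iteration -------

theorem pvInvG_iter (M0 : Nat → Nat → Nat) (G0 : List (List (List Int)))
    (h0 : pvInvG G0 M0) (n : Nat) :
    pvInvG ((PySem.List.pyRange 0 ↑n 1).foldl (fun A _ => pvTheta A) G0)
        (fun x y => M0 x y ^^^ (pvIterP (pvCN M0) n).1 x) ∧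
      ∀ x : Nat, pvCN (fun a b => M0 a b ^^^ (pvIterP (pvCN M0) n).1 a) x =
        (pvIterP (pvCN M0) n).2 x := by
  induction n with
  | zero =>
    rw [PySem.List.pyRange_one_eq_nil (by omega)]
    constructor
    · exact pvInvG_congr (fun x y => by simp [pvIterP]) h0
    · intro x
      rw [pvCN_xor]
      simp [pvIterP]
  | succ n ih =>
    obtain ⟨ihG, ihC⟩ := ih
    have hsplit : PySem.List.pyRange 0 ((n : Int) + 1) 1 =
        PySem.List.pyRange 0 (n : Int) 1 ++ [(n : Int)] :=
      PySem.List.pyRange_one_succ_right (by omega)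
    rw [show ((n + 1 : Nat) : Int) = (n : Int) + 1 by push_cast; ring, hsplit,
      List.foldl_append, List.foldl_cons, List.foldl_nil]
    have hstep := pvInvG_theta ihG
    constructor
    · refine pvInvG_congr (fun x y => ?_) hstep
      show (M0 x y ^^^ (pvIterP (pvCN M0) n).1 x) ^^^
          pvDF (pvCN fun a b => M0 a b ^^^ (pvIterP (pvCN M0) n).1 a) x = _
      rw [pvDF_congr ihC x, Nat.xor_assoc]
      rfl
    · intro x
      rw [pvCN_xor]
      show pvCN M0 x ^^^ ((pvIterP (pvCN M0) n).1 x ^^^ pvDF (pvIterP (pvCN M0) n).2 x) = _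
      rw [← Nat.xor_assoc]
      have hx := ihC x
      rw [pvCN_xor] at hx
      show _ = (pvIterP (pvCN M0) n).2 x ^^^ pvDF (pvIterP (pvCN M0) n).2 x
      rw [← hx]

-- B-side: the round loop represents pvIterP -----------------------------------

theorem pvLanesC_spec (L : List (List Int)) (M : Nat → Nat → Nat) (hrep : pvLanesRep L M)
    (x : Nat) (hx : x < 5) : PySem.List.pyGetD (pvLanesC L) ↑x 0 = ↑(pvCN M x) := by
  unfold pvLanesC
  rw [PySem.List.pyGetD_map_pyRange_of_nonneg _ 5 ↑x 0 (by omega) (by exact_mod_cast hx)]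
  have h0 := (hrep.2 x 0 hx (by omega)).1
  have h1 := (hrep.2 x 1 hx (by omega)).1
  have h2 := (hrep.2 x 2 hx (by omega)).1
  have h3 := (hrep.2 x 3 hx (by omega)).1
  have h4 := (hrep.2 x 4 hx (by omega)).1
  push_cast at h0 h1 h2 h3 h4
  rw [h0, h1, h2, h3, h4]
  simp [pvCN, PySem.Int.bxor_natCast]

theorem pvRoundB_D {c : List Int} {C : Nat → Nat} (hc : pvERep c C) (x : Nat) (hx : x < 5) :
    PySem.List.pyGetD ((PySem.List.pyRange 0 5 1).map (fun x =>
      PySem.Int.bxor (PySem.List.pyGetD c (PySem.Int.mod (x - 1) 5) 0)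
        (PySem.Int.band (PySem.Int.bor ((PySem.List.pyGetD c (PySem.Int.mod (x + 1) 5) 0) <<< 1)
          ((PySem.List.pyGetD c (PySem.Int.mod (x + 1) 5) 0) >>> 63)) pvMask))) ↑x 0 =
      ↑(pvDF C x) := by
  rw [PySem.List.pyGetD_map_pyRange_of_nonneg _ 5 ↑x 0 (by omega) (by exact_mod_cast hx),
    pv_modm1_5_cast x, pv_modp1_5_cast x,
    hc ((x + 4) % 5) (by omega), hc ((x + 1) % 5) (by omega),
    pv_int_shiftl1_cast, pv_int_shiftr63_cast, pv_mask_cast]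
  simp only [PySem.Int.bor_natCast, PySem.Int.band_natCast, PySem.Int.bxor_natCast]
  rfl

theorem pvRoundB_rep {e c : List Int} {E C : Nat → Nat} (he : pvERep e E) (hc : pvERep c C) :
    pvERep (pvRoundB (e, c)).1 (fun x => E x ^^^ pvDF C x) ∧
      pvERep (pvRoundB (e, c)).2 (fun x => C x ^^^ pvDF C x) := by
  constructor
  · intro x hx
    show PySem.List.pyGetD ((PySem.List.pyRange 0 5 1).map _) ↑x 0 = _
    rw [PySem.List.pyGetD_map_pyRange_of_nonneg _ 5 ↑x 0 (by omega) (by exact_mod_cast hx),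
      he x hx, pvRoundB_D hc x hx, PySem.Int.bxor_natCast]
  · intro x hx
    show PySem.List.pyGetD ((PySem.List.pyRange 0 5 1).map _) ↑x 0 = _
    rw [PySem.List.pyGetD_map_pyRange_of_nonneg _ 5 ↑x 0 (by omega) (by exact_mod_cast hx),
      hc x hx, pvRoundB_D hc x hx, PySem.Int.bxor_natCast]

theorem pvFoldB_rep (e0 c0 : List Int) (C0 : Nat → Nat)
    (he : pvERep e0 (fun _ => 0)) (hc : pvERep c0 C0) (n : Nat) :
    pvERep ((PySem.List.pyRange 0 ↑n 1).foldl (fun p _ => pvRoundB p) (e0, c0)).1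
        (pvIterP C0 n).1 ∧
      pvERep ((PySem.List.pyRange 0 ↑n 1).foldl (fun p _ => pvRoundB p) (e0, c0)).2
        (pvIterP C0 n).2 := by
  induction n with
  | zero =>
    rw [PySem.List.pyRange_one_eq_nil (by omega)]
    exact ⟨he, hc⟩
  | succ n ih =>
    obtain ⟨ihe, ihc⟩ := ih
    have hsplit : PySem.List.pyRange 0 ((n : Int) + 1) 1 =
        PySem.List.pyRange 0 (n : Int) 1 ++ [(n : Int)] :=
      PySem.List.pyRange_one_succ_right (by omega)
    rw [show ((n + 1 : Nat) : Int) = (n : Int) + 1 by push_cast; ring, hsplit,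
      List.foldl_append, List.foldl_cons, List.foldl_nil]
    have h := pvRoundB_rep (e := ((PySem.List.pyRange 0 ↑n 1).foldl (fun p _ => pvRoundB p) (e0, c0)).1)
      (c := ((PySem.List.pyRange 0 ↑n 1).foldl (fun p _ => pvRoundB p) (e0, c0)).2) ihe ihc
    exact h

theorem pvERep_zero : pvERep (List.replicate 5 (0 : Int)) (fun _ => 0) := by
  intro x hx
  simp only [PySem.List.pyGetD_natCast]
  rw [List.getD_replicate _ (by simpa using hx)]
  simp

-- initial states agree --------------------------------------------------------

theorem pvInv_init (cs : List Char) (hlen : cs.length ≤ 1600)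
    (hc : ∀ c ∈ cs, c = '0' ∨ c = '1') :
    ∃ M : Nat → Nat → Nat, pvLanesRep (pvScatterB cs) M ∧ pvInvG (pvScatterA cs) M := by
  obtain ⟨hAs, hAg⟩ := pvScatterA_spec cs hlen
  obtain ⟨M, hrep, hbit⟩ := pvScatterB_spec cs hlen
  refine ⟨M, hrep, hAs, fun x y hx hy => (hrep.2 x y hx hy).2, ?_⟩
  intro x y z hx hy hz
  rw [hAg x y z hx hy hz]
  have hb := hbit x y z hx hy hz
  by_cases hlt : x + 5 * y + 25 * z < cs.length
  · rw [if_pos hlt]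
    have hmem : cs.getD (x + 5 * y + 25 * z) ' ' ∈ cs := by
      rw [List.getD_eq_getElem _ _ hlt]
      exact List.getElem_mem _
    rcases hc _ hmem with h0 | h0 <;> rw [h0] at hb ⊢
    · have hv : (PySem.Int.ofChars? ['0']).getD 0 = 0 := by decide
      have hfalse : decide (x + 5 * y + 25 * z < cs.length ∧ ('0' : Char) = '1') = false := by
        simp
      rw [hv, hb, hfalse]
      rfl
    · have hv : (PySem.Int.ofChars? ['1']).getD 0 = 1 := by decide
      have htrue : decide (x + 5 * y + 25 * z < cs.length ∧ ('1' : Char) = '1') = true := by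
        simp [hlt]
      rw [hv, hb, htrue]
      rfl
  · rw [if_neg hlt]
    have hfalse : decide (x + 5 * y + 25 * z < cs.length ∧ cs.getD (x + 5 * y + 25 * z) ' ' = '1') = false := by
      simp [hlt]
    rw [hb, hfalse]
    rfl

-- serializations agree --------------------------------------------------------

theorem pv_int_shiftr_cast (m k : Nat) : ((m : Int) >>> ((k : Nat) : Int)) = ((m >>> k : Nat) : Int) :=
  Int.shiftRight_natCast m k

theorem pv_band_shift (m k : Nat) :
    PySem.Int.band ((m : Int) >>> ((k : Nat) : Int)) 1 = pvB2I (m.testBit k) := by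
  rw [pv_int_shiftr_cast, PySem.Int.band_one, PySem.Int.mod_eq_emod_of_pos (by omega)]
  have hdiv : m >>> k = m / 2 ^ k := Nat.shiftRight_eq_div_pow m k
  rcases hbit : m.testBit k with hf | ht
  · have : m / 2 ^ k % 2 ≠ 1 := by
      intro hcon
      rw [Nat.testBit_eq_decide_div_mod_eq, hcon] at hbit
      simp at hbit
    have h2 : m >>> k % 2 = 0 := by omega
    show ((m >>> k : Nat) : Int) % 2 = pvB2I false
    simp only [pvB2I, if_false, Bool.false_eq_true]
    generalize m >>> k = t at h2
    omega
  · have h1 : m / 2 ^ k % 2 = 1 := by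
      rw [Nat.testBit_eq_decide_div_mod_eq] at hbit
      simpa using hbit
    have h2 : m >>> k % 2 = 1 := by omega
    show ((m >>> k : Nat) : Int) % 2 = pvB2I true
    simp only [pvB2I, if_true]
    generalize m >>> k = t at h2
    omega

theorem pvSerial_eq {G : List (List (List Int))} {L : List (List Int)} {e : List Int}
    {M : Nat → Nat → Nat} {E : Nat → Nat}
    (hG : pvInvG G (fun x y => M x y ^^^ E x)) (hL : pvLanesRep L M) (he : pvERep e E) :
    pvSerialA G = pvSerialB L e := by
  obtain ⟨hsh, hlt, hbits⟩ := hG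
  unfold pvSerialA pvSerialB
  congr 1
  rw [List.flatMap_def, List.flatMap_def]
  congr 1
  apply List.map_congr_left
  intro x hxmem
  obtain ⟨hx0, hx5⟩ := PySem.List.mem_pyRange_one.mp hxmem
  obtain ⟨xn, rfl⟩ : ∃ xn : Nat, x = ↑xn := ⟨x.toNat, (Int.toNat_of_nonneg hx0).symm⟩
  rw [List.flatMap_def, List.flatMap_def]
  congr 1
  apply List.map_congr_left
  intro y hymem
  obtain ⟨hy0, hy5⟩ := PySem.List.mem_pyRange_one.mp hymem
  obtain ⟨yn, rfl⟩ : ∃ yn : Nat, y = ↑yn := ⟨y.toNat, (Int.toNat_of_nonneg hy0).symm⟩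
  apply List.map_congr_left
  intro z hzmem
  obtain ⟨hz0, hz64⟩ := PySem.List.mem_pyRange_one.mp hzmem
  obtain ⟨zn, rfl⟩ : ∃ zn : Nat, z = ↑zn := ⟨z.toNat, (Int.toNat_of_nonneg hz0).symm⟩
  have hxb : xn < 5 := by exact_mod_cast hx5
  have hyb : yn < 5 := by exact_mod_cast hy5
  have hzb : zn < 64 := by exact_mod_cast hz64
  rw [hbits xn yn zn hxb hyb hzb, (hL.2 xn yn hxb hyb).1, he xn hxb,
    PySem.Int.bxor_natCast, Int.toNat_natCast, pv_band_shift]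

set_option maxRecDepth 4096 in
theorem pvBits_facts (S : String) (h : Pre_permutation_function S) :
    (pvBits S).length = 1600 ∧ ∀ c ∈ pvBits S, c = '0' ∨ c = '1' := by
  obtain ⟨hsome, hnn, hlt⟩ := h
  set n : Int := (PySem.Int.ofStrBase? S 16).getD 0 with hn
  have hdig : ∀ c ∈ Nat.toDigits 2 n.toNat, c = '0' ∨ c = '1' := by
    have hcore : ∀ (f m : Nat) (acc : List Char), (∀ c ∈ acc, c = '0' ∨ c = '1') →
        ∀ c ∈ Nat.toDigitsCore 2 f m acc, c = '0' ∨ c = '1' := by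
      intro f
      induction f with
      | zero => intro m acc hacc c hcm; exact hacc c hcm
      | succ f ih =>
        intro m acc hacc c hcm
        have hstep : Nat.toDigitsCore 2 (f + 1) m acc =
            (if m / 2 = 0 then (m % 2).digitChar :: acc
             else Nat.toDigitsCore 2 f (m / 2) ((m % 2).digitChar :: acc)) := rfl
        have hdc : (m % 2).digitChar = '0' ∨ (m % 2).digitChar = '1' := by
          have h2 : m % 2 = 0 ∨ m % 2 = 1 := by omega
          rcases h2 with h2 | h2 <;> rw [h2] <;> simp [Nat.digitChar]
        rw [hstep] at hcm
        split at hcm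
        · rcases List.mem_cons.mp hcm with rfl | hcm'
          · exact hdc
          · exact hacc c hcm'
        · exact ih (m / 2) _ (by
            intro c' hc'
            rcases List.mem_cons.mp hc' with rfl | hc''
            · exact hdc
            · exact hacc c' hc'') c hcm
    exact hcore _ _ [] (by simp)
  have htn : n.toNat < 2 ^ 1600 := by
    have hpow : (2 ^ 1600 : Nat) = 44462416477094044620016814065517364315819234512137839319418223093753683069769152238984782576173969417485953521141049383745107056455283979316385016701612810119562585078620415976730705698345087039035930761275083827265405596065418173652685035788898113991627042329246850314029877161622487411877779578892097029690461532001915311366862468942148892205997883828265721290296220249202674740669814705818564765009960300389641843321936008416473775144511929246788246559538970957296160626364645376 := by decide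
    rw [hpow]
    omega
  have hdlen : (Nat.toDigits 2 n.toNat).length ≤ 1600 :=
    Nat.toDigits_length 2 n.toNat 1600 (by norm_num) htn
  have hbin : PySem.List.slice (PySem.Int.toBinChars0b n) (some 2) none = Nat.toDigits 2 n.toNat := by
    rw [PySem.List.slice_from _ (by omega)]
    have : PySem.Int.toBinChars0b n = '0' :: 'b' :: Nat.toDigits 2 n.toNat := by
      unfold PySem.Int.toBinChars0b
      rw [if_neg (by omega)]
    rw [this]
    rfl
  have hbits_eq : pvBits S = PySem.Chars.zfill (Nat.toDigits 2 n.toNat) 1600 := by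
    unfold pvBits
    rw [← hn, hbin]
  constructor
  · rw [hbits_eq, PySem.Chars.length_zfill]
    simp
    omega
  · intro c hcm
    rw [hbits_eq] at hcm
    -- zfill only prepends '0' characters (possibly after a sign char taken from the list itself)
    have hz : ∀ (cs : List Char) (w : Int), ∀ c ∈ PySem.Chars.zfill cs w, c ∈ cs ∨ c = '0' := by
      intro cs w c hc
      unfold PySem.Chars.zfill at hc
      split at hc
      · exact Or.inl hc
      · split at hc
        · next c0 rest =>
          split at hc
          · rcases List.mem_cons.mp hc with rfl | hc'
            · exact Or.inl List.mem_cons_self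
            · rcases List.mem_append.mp hc' with hc'' | hc''
              · exact Or.inr (List.eq_of_mem_replicate hc'')
              · exact Or.inl (List.mem_cons_of_mem _ hc'')
          · rcases List.mem_append.mp hc with hc'' | hc''
            · exact Or.inr (List.eq_of_mem_replicate hc'')
            · exact Or.inl hc''
        · exact Or.inr (List.eq_of_mem_replicate hc)
    rcases hz _ _ c hcm with hcin | rfl
    · exact hdig c hcin
    · exact Or.inl rfl

-- ===== VERDICT (by name: the statement is the Claim_ definition above) =====
theorem permutation_function_spec : Claim_equal_permutation_function := by
  intro S _ hPre
  show _ = _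
  obtain ⟨hlen, hc⟩ := pvBits_facts S hPre
  obtain ⟨M, hLrep, hGinv⟩ := pvInv_init (pvBits S) (by omega) hc
  obtain ⟨h24G, _⟩ := pvInvG_iter M (pvScatterA (pvBits S)) hGinv 24
  have hc0 : pvERep (pvLanesC (pvScatterB (pvBits S))) (pvCN M) :=
    fun x hx => pvLanesC_spec _ M hLrep x hx
  obtain ⟨hE, _⟩ := pvFoldB_rep (List.replicate 5 (0 : Int)) (pvLanesC (pvScatterB (pvBits S)))
    (pvCN M) pvERep_zero hc0 24
  unfold permutation_function permutation_function_alt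
  have h24 : ((24 : Nat) : Int) = (24 : Int) := rfl
  rw [h24] at h24G hE
  show pvFormat _ = pvFormat (pvSerialB (pvScatterB (pvBits S))
    ((PySem.List.pyRange 0 24 1).foldl (fun p _ => pvRoundB p)
      (List.replicate 5 (0 : Int), pvLanesC (pvScatterB (pvBits S)))).1)
  rw [pvSerial_eq (E := (pvIterP (pvCN M) 24).1) h24G hLrep hE]
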